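-- pv_equiv track=rewrite | github.com/kjh03160/Algorithm_Basic | practice/Dynamic_Programming/Zoo_1309.py | answer
-- ===== SOURCE A (Python) =====
-- def answer(n):
--     DP = [[0, 0, 0] for _ in range(n + 1)]
--     DP[1] = [1, 1, 1]
--     for i in range(2, len(DP)):
--         DP[i][0] = sum(DP[i - 1]) % 9901
--         DP[i][1] = (DP[i - 1][0] + DP[i - 1][2]) % 9901
--         DP[i][2] = (DP[i - 1][0] + DP[i - 1][1]) % 9901
--     return sum(DP[-1]) % 9901
-- ===== SOURCE B (Python) =====
-- _T = ((1, 1, 1), (1, 0, 1), (1, 1, 0))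
--
--
-- def _mul(A, B):
--     (a, b, c), (d, e, f), (g, h, i) = A
--     (p, q, r), (s, t, u), (v, w, x) = B
--     return (((a * p + b * s + c * v) % 9901,
--              (a * q + b * t + c * w) % 9901,
--              (a * r + b * u + c * x) % 9901),
--             ((d * p + e * s + f * v) % 9901,
--              (d * q + e * t + f * w) % 9901,
--              (d * r + e * u + f * x) % 9901),
--             ((g * p + h * s + i * v) % 9901,
--              (g * q + h * t + i * w) % 9901,
--              (g * r + h * u + i * x) % 9901))
--
--
-- def _matpow(e):
--     if e == 0:
--         return ((1, 0, 0), (0, 1, 0), (0, 0, 1))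
--     half = _matpow(e // 2)
--     sq = _mul(half, half)
--     return _mul(_T, sq) if e % 2 else sq
--
--
-- def answer(n):
--     (a, b, c), (d, e, f), (g, h, i) = _matpow(n - 1)
--     return (a + b + c + d + e + f + g + h + i) % 9901
-- ===== Notes on version B (the rewrite author's own statement) =====
-- stated objective: faster
-- what changed: Replaces the O(n) row-by-row DP table with binary exponentiation of the 3x3 transition matrix mod 9901, combining O(log n) 3x3 matrix multiplications and summing the entries of M^(n-1).
import Mathlib
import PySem

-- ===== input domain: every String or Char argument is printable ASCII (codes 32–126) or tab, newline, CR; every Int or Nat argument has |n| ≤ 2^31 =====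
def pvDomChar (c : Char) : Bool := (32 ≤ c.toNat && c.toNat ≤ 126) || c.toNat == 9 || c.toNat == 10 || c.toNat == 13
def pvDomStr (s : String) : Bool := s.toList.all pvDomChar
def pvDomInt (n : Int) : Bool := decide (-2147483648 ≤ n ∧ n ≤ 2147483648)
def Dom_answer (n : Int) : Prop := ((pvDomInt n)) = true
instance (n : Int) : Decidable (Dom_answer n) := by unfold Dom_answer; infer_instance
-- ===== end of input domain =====

-- B replaces A's linear DP over 2×n columns by binary matrix exponentiation of the
-- 3×3 transition matrix mod 9901 (O(log n) multiplications instead of O(n) rows).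

-- ===== PORT A =====
-- literal transliteration of A: build the (n+1)-row table, seed row 1, fill rows 2..n,
-- return sum(DP[-1]) % 9901 (DP[-1] read as the row at index length-1, exact for nonempty DP)
def answer (n : Int) : Int :=
  let DP0 : List (List Int) := List.replicate (n + 1).toNat [0, 0, 0]
  let DP1 := DP0.set 1 [1, 1, 1]
  let DPf := (PySem.List.pyRange 2 (DP1.length : Int) 1).foldl
    (fun d i =>
      let prev := d.getD (i - 1).toNat []
      d.set i.toNat
        [prev.sum % 9901,
         (prev.getD 0 0 + prev.getD 2 0) % 9901,
         (prev.getD 0 0 + prev.getD 1 0) % 9901]) DP1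
  (DPf.getD (DPf.length - 1) []).sum % 9901

-- ===== PORT B =====
def pvMat : Type := (Int × Int × Int) × (Int × Int × Int) × (Int × Int × Int)

def pvT : pvMat := ((1, 1, 1), (1, 0, 1), (1, 1, 0))

def pvMul (A B : pvMat) : pvMat :=
  let ((a, b, c), (d, e, f), (g, h, i)) := A
  let ((p, q, r), (s, t, u), (v, w, x)) := B
  (((a * p + b * s + c * v) % 9901,
    (a * q + b * t + c * w) % 9901,
    (a * r + b * u + c * x) % 9901),
   ((d * p + e * s + f * v) % 9901,
    (d * q + e * t + f * w) % 9901,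
    (d * r + e * u + f * x) % 9901),
   ((g * p + h * s + i * v) % 9901,
    (g * q + h * t + i * w) % 9901,
    (g * r + h * u + i * x) % 9901))

-- Source B recurses on the Python int e; ported as the same binary recursion on e as a Nat
def pvMatpow (e : Nat) : pvMat :=
  if e = 0 then ((1, 0, 0), (0, 1, 0), (0, 0, 1))
  else
    let half := pvMatpow (e / 2)
    let sq := pvMul half half
    if e % 2 = 1 then pvMul pvT sq else sq
decreasing_by exact Nat.div_lt_self (Nat.pos_of_ne_zero (by assumption)) one_lt_two

def answer_alt (n : Int) : Int :=
  let ((a, b, c), (d, e, f), (g, h, i)) := pvMatpow (n - 1).toNat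
  (a + b + c + d + e + f + g + h + i) % 9901

-- ===== PRECONDITION & SPEC =====
-- Pre_ excludes n ≤ 0, on which A raises (IndexError on DP[1] for n ≤ 0); B also raises there (RecursionError).
def Pre_answer (n : Int) : Prop := 1 ≤ n
instance (n : Int) : Decidable (Pre_answer n) := by unfold Pre_answer; infer_instance
def pvWitness_answer : Int := 5

def Spec_answer (n : Int) (out : Int) : Prop := out = answer_alt n
instance (n : Int) (out : Int) : Decidable (Spec_answer n out) := by unfold Spec_answer; infer_instance

-- ===== CLAIM (what is proved, stated in full; the proofs are below) =====
def Claim_equal_answer : Prop := ∀ (n : Int), Dom_answer n → Pre_answer n → Spec_answer n (answer n)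

-- ===== LEMMAS AND PROOFS =====

theorem pvCastMod (x : Int) : ((x % 9901 : Int) : ZMod 9901) = (x : ZMod 9901) := by
  have h := ZMod.intCast_mod x 9901
  norm_num at h
  exact h

def pvCastM (A : pvMat) : Matrix (Fin 3) (Fin 3) (ZMod 9901) :=
  !![(A.1.1 : ZMod 9901), (A.1.2.1 : ZMod 9901), (A.1.2.2 : ZMod 9901);
     (A.2.1.1 : ZMod 9901), (A.2.1.2.1 : ZMod 9901), (A.2.1.2.2 : ZMod 9901);
     (A.2.2.1 : ZMod 9901), (A.2.2.2.1 : ZMod 9901), (A.2.2.2.2 : ZMod 9901)]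

def pvTz : Matrix (Fin 3) (Fin 3) (ZMod 9901) := !![1, 1, 1; 1, 0, 1; 1, 1, 0]

def pvStep (v : Int × Int × Int) : Int × Int × Int :=
  ((v.1 + v.2.1 + v.2.2) % 9901, (v.1 + v.2.2) % 9901, (v.1 + v.2.1) % 9901)

def pvIter : Nat → Int × Int × Int
  | 0 => (1, 1, 1)
  | t + 1 => pvStep (pvIter t)

def pvRowSums (P : Matrix (Fin 3) (Fin 3) (ZMod 9901)) : ZMod 9901 × ZMod 9901 × ZMod 9901 :=
  (P 0 0 + P 0 1 + P 0 2, P 1 0 + P 1 1 + P 1 2, P 2 0 + P 2 1 + P 2 2)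

def pvTotal (P : Matrix (Fin 3) (Fin 3) (ZMod 9901)) : ZMod 9901 :=
  (pvRowSums P).1 + (pvRowSums P).2.1 + (pvRowSums P).2.2

theorem pvCastM_mul (A B : pvMat) : pvCastM (pvMul A B) = pvCastM A * pvCastM B := by
  obtain ⟨⟨a, b, c⟩, ⟨d, e, f⟩, ⟨g, h, i⟩⟩ := A
  obtain ⟨⟨p, q, r⟩, ⟨s, t, u⟩, ⟨v, w, x⟩⟩ := B
  simp only [pvMul, pvCastM, Matrix.mul_fin_three]
  norm_num [pvCastMod]

theorem pvCastM_T : pvCastM pvT = pvTz := by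
  norm_num [pvCastM, pvT, pvTz]

theorem pvCastM_matpow (e : Nat) : pvCastM (pvMatpow e) = pvTz ^ e := by
  induction e using Nat.strong_induction_on with
  | _ e ih =>
    rw [pvMatpow]
    by_cases h0 : e = 0
    · subst h0
      simp [pvCastM, pvTz, Matrix.one_fin_three]
    · simp only [h0, if_false]
      have hlt : e / 2 < e := Nat.div_lt_self (Nat.pos_of_ne_zero h0) one_lt_two
      have hih := ih (e / 2) hlt
      have hsq : pvCastM (pvMul (pvMatpow (e / 2)) (pvMatpow (e / 2))) = pvTz ^ (e / 2 + e / 2) := by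
        rw [pvCastM_mul, hih, pow_add]
      by_cases hpar : e % 2 = 1
      · simp only [hpar, if_true]
        rw [pvCastM_mul, hsq, pvCastM_T,
          show pvTz * pvTz ^ (e / 2 + e / 2) = pvTz ^ (e / 2 + e / 2 + 1) from
            (pow_succ' pvTz _).symm]
        congr 1
        omega
      · have he : e = e / 2 + e / 2 := by omega
        simp only [hpar, if_false]
        rw [hsq, ← he]

theorem pvStep_cast (v : Int × Int × Int) (P : Matrix (Fin 3) (Fin 3) (ZMod 9901))
    (h1 : (v.1 : ZMod 9901) = (pvRowSums P).1)
    (h2 : (v.2.1 : ZMod 9901) = (pvRowSums P).2.1)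
    (h3 : (v.2.2 : ZMod 9901) = (pvRowSums P).2.2) :
    (((pvStep v).1 : ZMod 9901), ((pvStep v).2.1 : ZMod 9901), ((pvStep v).2.2 : ZMod 9901))
      = pvRowSums (pvTz * P) := by
  simp only [pvRowSums] at h1 h2 h3
  rw [Matrix.eta_fin_three P] at h1 h2 h3 ⊢
  simp only [pvStep, pvRowSums, pvTz, Matrix.mul_fin_three] at h1 h2 h3 ⊢
  norm_num [pvCastMod, Matrix.cons_val_zero, Matrix.cons_val_one, Matrix.cons_val_two, Matrix.head_cons, Matrix.tail_cons] at h1 h2 h3 ⊢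
  refine ⟨?_, ?_, ?_⟩
  · linear_combination h1 + h2 + h3
  · linear_combination h1 + h3
  · linear_combination h1 + h2

theorem pvIter_cast (t : Nat) :
    (((pvIter t).1 : ZMod 9901), ((pvIter t).2.1 : ZMod 9901), ((pvIter t).2.2 : ZMod 9901))
      = pvRowSums (pvTz ^ t) := by
  induction t with
  | zero =>
    norm_num [pvIter, pvRowSums, Matrix.one_fin_three, Matrix.cons_val_zero, Matrix.cons_val_one, Matrix.cons_val_two, Matrix.head_cons, Matrix.tail_cons]
  | succ t ih =>
    have h1 := congrArg Prod.fst ih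
    have h2 := congrArg (fun p => p.2.1) ih
    have h3 := congrArg (fun p => p.2.2) ih
    simp only at h1 h2 h3
    have := pvStep_cast (pvIter t) (pvTz ^ t) h1 h2 h3
    rw [show pvIter (t + 1) = pvStep (pvIter t) from rfl, pow_succ']
    exact this

theorem pvAlt_char (n : Int) :
    ((answer_alt n : Int) : ZMod 9901) = pvTotal (pvTz ^ (n - 1).toNat) := by
  rw [← pvCastM_matpow]
  unfold answer_alt
  rcases hP : pvMatpow (n - 1).toNat with ⟨⟨a, b, c⟩, ⟨d, e, f⟩, ⟨g, h, i⟩⟩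
  simp only [pvCastM, pvTotal, pvRowSums]
  norm_num [pvCastMod, Matrix.cons_val_zero, Matrix.cons_val_one, Matrix.cons_val_two, Matrix.head_cons, Matrix.tail_cons]
  ring

theorem pvAlt_mod (n : Int) : answer_alt n % 9901 = answer_alt n := by
  unfold answer_alt
  rcases pvMatpow (n - 1).toNat with ⟨⟨a, b, c⟩, ⟨d, e, f⟩, ⟨g, h, i⟩⟩
  simp [Int.emod_emod_of_dvd]

-- the fold A performs, restated over List.range for induction
def pvFoldA (n : Int) (t : Nat) : List (List Int) :=
  List.foldl
    (fun d i =>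
      d.set i.toNat
        [(d.getD (i - 1).toNat []).sum % 9901,
         ((d.getD (i - 1).toNat []).getD 0 0 + (d.getD (i - 1).toNat []).getD 2 0) % 9901,
         ((d.getD (i - 1).toNat []).getD 0 0 + (d.getD (i - 1).toNat []).getD 1 0) % 9901])
    ((List.replicate (n + 1).toNat ([0, 0, 0] : List Int)).set 1 [1, 1, 1])
    (List.map (fun (k : Nat) => 2 + (k : Int)) (List.range t))

theorem pvFoldA_succ (n : Int) (t : Nat) :
    pvFoldA n (t + 1) =
      (pvFoldA n t).set ((2 + (t : Int))).toNat
        [((pvFoldA n t).getD ((2 + (t : Int)) - 1).toNat []).sum % 9901,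
         (((pvFoldA n t).getD ((2 + (t : Int)) - 1).toNat []).getD 0 0
            + ((pvFoldA n t).getD ((2 + (t : Int)) - 1).toNat []).getD 2 0) % 9901,
         (((pvFoldA n t).getD ((2 + (t : Int)) - 1).toNat []).getD 0 0
            + ((pvFoldA n t).getD ((2 + (t : Int)) - 1).toNat []).getD 1 0) % 9901] := by
  simp [pvFoldA, List.range_succ]

theorem pvInv (n : Int) (hn : 1 ≤ n) (t : Nat) (ht : (t : Int) ≤ n - 1) :
    (pvFoldA n t).length = (n + 1).toNat ∧
      (pvFoldA n t).getD (t + 1) [] = [(pvIter t).1, (pvIter t).2.1, (pvIter t).2.2] := by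
  induction t with
  | zero =>
    constructor
    · simp [pvFoldA]
    · have h1 : 1 < ((List.replicate (n + 1).toNat ([0, 0, 0] : List Int)).length) := by
        simp; omega
      simp [pvFoldA, pvIter, List.getD, List.getElem?_set_eq_of_lt _ h1]
  | succ t ih =>
    have ht' : (t : Int) ≤ n - 1 := by push_cast at ht ⊢; omega
    obtain ⟨ihl, ihv⟩ := ih ht'
    have hidx : (((2 : Int) + t) - 1).toNat = t + 1 := by omega
    have hset : ((2 : Int) + t).toNat = t + 2 := by omega
    have hlt : t + 2 < (pvFoldA n t).length := by rw [ihl]; omega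
    rw [pvFoldA_succ]
    simp only [hidx, hset, ihv]
    constructor
    · simp [ihl]
    · have : pvIter (t + 1) = pvStep (pvIter t) := rfl
      rw [this]
      simp [List.getD, List.getElem?_set_eq_of_lt _ hlt, pvStep]
      omega

theorem pvFoldA_eq (n : Int) (t : Nat) :
    pvFoldA n t =
      List.foldl
        (fun d i =>
          d.set i.toNat
            [(d.getD (i - 1).toNat []).sum % 9901,
             ((d.getD (i - 1).toNat []).getD 0 0 + (d.getD (i - 1).toNat []).getD 2 0) % 9901,
             ((d.getD (i - 1).toNat []).getD 0 0 + (d.getD (i - 1).toNat []).getD 1 0) % 9901])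
        ((List.replicate (n + 1).toNat ([0, 0, 0] : List Int)).set 1 [1, 1, 1])
        (List.map (fun (k : Nat) => 2 + (k : Int)) (List.range t)) := rfl

theorem pvA_char (n : Int) (hn : 1 ≤ n) :
    answer n = ((pvIter (n - 1).toNat).1 + (pvIter (n - 1).toNat).2.1
      + (pvIter (n - 1).toNat).2.2) % 9901 := by
  have hlen : ((((List.replicate (n + 1).toNat ([0, 0, 0] : List Int)).set 1 [1, 1, 1]).length : Int))
      = n + 1 := by simp; omega
  obtain ⟨hl, hv⟩ := pvInv n hn (n - 1).toNat (by omega)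
  simp only [answer]
  rw [hlen, PySem.List.pyRange_one]
  have hrange : ((n + 1) - 2).toNat = (n - 1).toNat := by omega
  rw [hrange]
  rw [← pvFoldA_eq n (n - 1).toNat]
  have hL : (pvFoldA n (n - 1).toNat).length - 1 = (n - 1).toNat + 1 := by rw [hl]; omega
  rw [hL, hv]
  simp [List.sum_cons]
  all_goals ring_nf

-- ===== VERDICT (by name: the statement is the Claim_ definition above) =====
theorem answer_spec : Claim_equal_answer := by
  unfold Claim_equal_answer
  intro n _ hn
  unfold Spec_answer
  have hA := pvA_char n hn
  have hcast : ((answer n : Int) : ZMod 9901) = pvTotal (pvTz ^ (n - 1).toNat) := by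
    rw [hA, pvCastMod]
    have h1 := congrArg Prod.fst (pvIter_cast (n - 1).toNat)
    have h2 := congrArg (fun p => p.2.1) (pvIter_cast (n - 1).toNat)
    have h3 := congrArg (fun p => p.2.2) (pvIter_cast (n - 1).toNat)
    simp only at h1 h2 h3
    push_cast
    rw [h1, h2, h3]
    rfl
  have hB := pvAlt_char n
  have hmod : answer n % 9901 = answer_alt n % 9901 := by
    have := (ZMod.intCast_eq_intCast_iff' (answer n) (answer_alt n) 9901).mp
      (hcast.trans hB.symm)
    norm_num at this
    exact this
  have hAm : answer n % 9901 = answer n := by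
    rw [hA]; simp [Int.emod_emod_of_dvd]
  rw [← hAm, hmod, pvAlt_mod]
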